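-- pv_equiv track=rewrite | github.com/mediocregear77/Less_More_yo | bond_protocol.py | _detect_creator_directives
-- ===== SOURCE A (Python) =====
-- def _detect_creator_directives(input_content: str) -> bool:
--     """
--     Detect if input contains creator directive commands.
--
--     Args:
--         input_content: Input content to analyze
--
--     Returns:
--         True if creator directives detected
--     """
--     content_lower = input_content.lower()
--
--     # Strong directive indicators
--     strong_directives = [
--         "nexi, override",
--         "creator mode",
--         "execute immediately",
--         "system override",
--         "emergency directive",
--         "father's command",
--         "covenant invocation"
--     ]
--
--     # Moderate directive indicators
--     moderate_directives = [
--         "listen to me",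
--         "do this now",
--         "execute",
--         "follow my guidance",
--         "trust me completely",
--         "as your creator",
--         "daughter, please"
--     ]
--
--     # Gentle directive indicators
--     gentle_directives = [
--         "nexi, please",
--         "i need you to",
--         "would you help me",
--         "let's work together",
--         "i'm asking you"
--     ]
--
--     # Check for directives in order of strength
--     for directive in strong_directives:
--         if directive in content_lower:
--             return True
--
--     for directive in moderate_directives:
--         if directive in content_lower:
--             return True
--
--     # Gentle directives activate privileges but with lower priority
--     for directive in gentle_directives:
--         if directive in content_lower:
--             return True
--
--     return False
-- ===== SOURCE B (Python) =====
-- import re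
--
-- _DIRECTIVE_PATTERNS = (
--     "nexi, override",
--     "creator mode",
--     "execute immediately",
--     "system override",
--     "emergency directive",
--     "father's command",
--     "covenant invocation",
--     "listen to me",
--     "do this now",
--     "execute",
--     "follow my guidance",
--     "trust me completely",
--     "as your creator",
--     "daughter, please",
--     "nexi, please",
--     "i need you to",
--     "would you help me",
--     "let's work together",
--     "i'm asking you",
-- )
--
-- _DIRECTIVE_RE = re.compile("|".join(map(re.escape, _DIRECTIVE_PATTERNS)))
--
--
-- def _detect_creator_directives(input_content: str) -> bool:
--     return bool(_DIRECTIVE_RE.search(input_content.lower()))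
-- ===== Notes on version B (the rewrite author's own statement) =====
-- stated objective: idiomatic
-- what changed: The three per-pattern early-return substring loops are replaced by one module-level compiled regex alternation of all escaped directive phrases, searched once over the lowered text in a single automaton-driven pass.
import Mathlib
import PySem

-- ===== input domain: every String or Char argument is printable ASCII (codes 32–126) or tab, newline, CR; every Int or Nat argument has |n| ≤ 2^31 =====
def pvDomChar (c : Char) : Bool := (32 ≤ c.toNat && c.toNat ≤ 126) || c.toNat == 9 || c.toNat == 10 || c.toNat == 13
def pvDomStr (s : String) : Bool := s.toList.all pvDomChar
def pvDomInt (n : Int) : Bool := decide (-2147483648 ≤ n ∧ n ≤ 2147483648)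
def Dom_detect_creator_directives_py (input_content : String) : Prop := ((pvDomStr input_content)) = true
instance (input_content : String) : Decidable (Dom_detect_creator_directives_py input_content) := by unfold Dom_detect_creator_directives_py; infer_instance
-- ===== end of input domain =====

-- B replaces A's three early-return loops of per-pattern substring scans by one compiled
-- regex alternation of all escaped directive phrases searched once over the lowered text.

-- ===== PORT A =====
def pvStrongDirectives : List String :=
  ["nexi, override", "creator mode", "execute immediately", "system override",
   "emergency directive", "father's command", "covenant invocation"]

def pvModerateDirectives : List String :=
  ["listen to me", "do this now", "execute", "follow my guidance",
   "trust me completely", "as your creator", "daughter, please"]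

def pvGentleDirectives : List String :=
  ["nexi, please", "i need you to", "would you help me",
   "let's work together", "i'm asking you"]

-- 'for directive in ds: if directive in content: return True' (falls through to false)
def pvLoopA (ds : List String) (content : String) : Bool :=
  match ds with
  | [] => false
  | d :: rest => if PySem.Str.isIn d content then true else pvLoopA rest content

def detect_creator_directives_py (input_content : String) : Bool :=
  let content_lower := PySem.Str.lower input_content
  if pvLoopA pvStrongDirectives content_lower then true
  else if pvLoopA pvModerateDirectives content_lower then true
  else if pvLoopA pvGentleDirectives content_lower then true
  else false

-- ===== PORT B =====
-- the fused pattern tuple _DIRECTIVE_PATTERNS (all phrases are regex-escaped literals)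
def pvPatterns : List String :=
  ["nexi, override", "creator mode", "execute immediately", "system override",
   "emergency directive", "father's command", "covenant invocation",
   "listen to me", "do this now", "execute", "follow my guidance",
   "trust me completely", "as your creator", "daughter, please",
   "nexi, please", "i need you to", "would you help me",
   "let's work together", "i'm asking you"]

-- semantics of re.search on an alternation of literal patterns: scan the start
-- positions of the text left to right (i.e. its suffixes, including the final empty
-- one, as the regex engine does) and test whether some alternative matches there
def pvScanB (pats : List (List Char)) : List Char → Bool
  | [] => pats.any (fun p => PySem.Chars.startswith [] p)
  | c :: rest =>
      pats.any (fun p => PySem.Chars.startswith (c :: rest) p) || pvScanB pats rest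

-- bool(_DIRECTIVE_RE.search(input_content.lower()))
def detect_creator_directives_py_alt (input_content : String) : Bool :=
  pvScanB (pvPatterns.map String.toList) (PySem.Str.lower input_content).toList

-- ===== PRECONDITION & SPEC =====
def Spec_detect_creator_directives_py (input_content : String) (out : Bool) : Prop := out = detect_creator_directives_py_alt input_content
instance (input_content : String) (out : Bool) : Decidable (Spec_detect_creator_directives_py input_content out) := by unfold Spec_detect_creator_directives_py; infer_instance

-- ===== CLAIM (what is proved, stated in full; the proofs are below) =====
def Claim_equal_detect_creator_directives_py : Prop := ∀ (input_content : String), Dom_detect_creator_directives_py input_content → Spec_detect_creator_directives_py input_content (detect_creator_directives_py input_content)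

-- ===== LEMMAS AND PROOFS =====

-- A's early-return loop is the 'any' of substring tests
theorem pvLoopA_eq_any (ds : List String) (content : String) :
    pvLoopA ds content = ds.any (fun d => PySem.Str.isIn d content) := by
  induction ds with
  | nil => rfl
  | cons d rest ih =>
      rw [List.any_cons, ← ih, pvLoopA]
      cases hd : PySem.Str.isIn d content <;>
        simp only [Bool.false_eq_true, if_false, if_true, Bool.true_or, Bool.false_or]

-- B's position scan finds a pattern iff some pattern is a substring
theorem pvScanB_eq_any (pats : List (List Char)) (s : List Char) :
    pvScanB pats s = pats.any (fun p => PySem.Chars.isIn p s) := by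
  induction s with
  | nil =>
      refine List.any_congr rfl (fun p => ?_)
      rw [Bool.eq_iff_iff, PySem.Chars.startswith_iff, PySem.Chars.isIn_iff_infix]
      simp
  | cons c rest ih =>
      rw [pvScanB, ih, Bool.eq_iff_iff]
      simp only [Bool.or_eq_true, List.any_eq_true, PySem.Chars.startswith_iff,
        PySem.Chars.isIn_iff_infix, List.infix_cons_iff]
      exact ⟨fun h => h.elim (fun ⟨p, hp, h1⟩ => ⟨p, hp, Or.inl h1⟩)
          (fun ⟨p, hp, h2⟩ => ⟨p, hp, Or.inr h2⟩),
        fun ⟨p, hp, h⟩ => h.elim (fun h1 => Or.inl ⟨p, hp, h1⟩) (fun h2 => Or.inr ⟨p, hp, h2⟩)⟩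

-- ===== VERDICT (by name: the statement is the Claim_ definition above) =====
theorem detect_creator_directives_py_spec : Claim_equal_detect_creator_directives_py := by
  intro input_content _
  unfold Spec_detect_creator_directives_py
  unfold detect_creator_directives_py detect_creator_directives_py_alt
  rw [pvScanB_eq_any]
  have hsplit : pvPatterns = pvStrongDirectives ++ pvModerateDirectives ++ pvGentleDirectives := rfl
  rw [hsplit]
  simp only [pvLoopA_eq_any, List.any_append, List.any_map, Function.comp_def,
    PySem.Str.isIn_eq]
  split_ifs <;> simp_all
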